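-- pv_equiv track=rewrite | github.com/raeeschaudhary/CSCI620-Big-Data | Individual Assignments/A3/q3_test2.py | build_lattice
-- ===== SOURCE A (Python) =====
-- from itertools import combinations
--
-- def build_lattice(col):
--     '''
--     Creates a lattice in form of a unidirectional graph
--     :param col: Column names
--     :return: lattice of attributes using itertools
--     '''
--     lattice = {}
--     # Initialize the lattice with empty lists for each attribute
--     for attribute in col:
--         lattice[attribute] = []
--
--         # Iterate over all combinations of column names taken two at a time
--         for combo in combinations(col, 2):
--             if attribute in combo:
--                 lattice[attribute].append(combo)
--
--     return lattice
-- ===== SOURCE B (Python) =====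
-- from itertools import combinations
--
-- def build_lattice(col):
--     # Dedupe keys, map each key to a bucket index, then a single pass over the
--     # combinations appends each pair to the bucket(s) of its two members.
--     keys = list(dict.fromkeys(col))
--     idx = {k: i for i, k in enumerate(keys)}
--     buckets = [[] for _ in keys]
--     for combo in combinations(col, 2):
--         x, y = combo
--         buckets[idx[x]].append(combo)
--         if y != x:
--             buckets[idx[y]].append(combo)
--     return dict(zip(keys, buckets))
-- ===== Notes on version B (the rewrite author's own statement) =====
-- stated objective: faster
-- what changed: Instead of re-enumerating all C(n,2) combinations once per attribute with a membership test into a dict, B dedupes the keys once, maps each key to a positional bucket, and makes a single pass over the combinations appending each pair to its two members' buckets.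
import Mathlib
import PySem

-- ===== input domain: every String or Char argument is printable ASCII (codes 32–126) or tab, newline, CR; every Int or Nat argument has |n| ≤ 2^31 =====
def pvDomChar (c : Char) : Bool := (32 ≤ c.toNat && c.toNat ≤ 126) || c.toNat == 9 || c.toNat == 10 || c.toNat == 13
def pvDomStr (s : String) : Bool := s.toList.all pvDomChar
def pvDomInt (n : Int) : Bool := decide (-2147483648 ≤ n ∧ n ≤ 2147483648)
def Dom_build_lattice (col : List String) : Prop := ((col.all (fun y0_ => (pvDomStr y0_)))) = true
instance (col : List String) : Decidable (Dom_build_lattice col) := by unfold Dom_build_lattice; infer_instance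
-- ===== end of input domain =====

-- B replaces A's per-attribute rescan of all combinations by: dedupe the keys once,
-- assign each key a positional bucket via an index map, and make one pass over the
-- combinations appending each pair to its two members' buckets (asymptotically faster).

-- itertools.combinations(col, 2) as PAIRS, in CPython's order (the 2-tuple form
-- required by the return type, ported by hand, exact: for i < j in index order,
-- the pair (col[i], col[j])).
def pyCombos2 : List String → List (String × String)
  | [] => []
  | x :: xs => xs.map (fun y => (x, y)) ++ pyCombos2 xs

-- ===== PORT A =====
def build_lattice (col : List String) : List (String × List (String × String)) :=
  (col.foldl
    (fun (lattice : PySem.Dict String (List (String × String))) attr =>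
      let lattice := lattice.insert attr []
      (pyCombos2 col).foldl
        (fun lattice combo =>
          if attr = combo.1 ∨ attr = combo.2 then
            lattice.modify attr [] (fun l => l ++ [combo])
          else lattice)
        lattice)
    PySem.Dict.empty).items

-- ===== PORT B =====
-- bucket indices read back from the idx dict are always nonnegative (they come from
-- enumerate), so .toNat on them is exact here
def build_lattice_alt (col : List String) : List (String × List (String × String)) :=
  let keys := PySem.List.dedup col
  let idx : PySem.Dict String Int :=
    (PySem.List.enumerate keys).foldl (fun d p => d.insert p.2 p.1) PySem.Dict.empty
  let buckets0 : List (List (String × String)) := keys.map (fun _ => [])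
  let buckets :=
    (pyCombos2 col).foldl
      (fun bs c =>
        let bs := bs.modify (idx.getD c.1 0).toNat (fun l => l ++ [c])
        if c.2 ≠ c.1 then bs.modify (idx.getD c.2 0).toNat (fun l => l ++ [c]) else bs)
      buckets0
  keys.zip buckets

-- ===== PRECONDITION & SPEC =====
def Spec_build_lattice (col : List String) (out : List (String × List (String × String))) : Prop := out = build_lattice_alt col
instance (col : List String) (out : List (String × List (String × String))) : Decidable (Spec_build_lattice col out) := by unfold Spec_build_lattice; infer_instance

-- ===== CLAIM (what is proved, stated in full; the proofs are below) =====
def Claim_equal_build_lattice : Prop := ∀ (col : List String), Dom_build_lattice col → Spec_build_lattice col (build_lattice col)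

-- ===== LEMMAS AND PROOFS =====

-- both components of every generated pair are members of col
theorem pyCombos2_mem (col : List String) (c : String × String) (h : c ∈ pyCombos2 col) :
    c.1 ∈ col ∧ c.2 ∈ col := by
  induction col with
  | nil => simp [pyCombos2] at h
  | cons x xs ih =>
    simp only [pyCombos2, List.mem_append, List.mem_map] at h
    rcases h with ⟨y, hy, rfl⟩ | h
    · exact ⟨List.mem_cons_self, List.mem_cons_of_mem _ hy⟩
    · exact ⟨List.mem_cons_of_mem _ (ih h).1, List.mem_cons_of_mem _ (ih h).2⟩

-- ---- A's inner loop: value at k ----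
theorem innerA_getD (cs : List (String × String)) (a : String)
    (d : PySem.Dict String (List (String × String))) (k : String) :
    (cs.foldl
      (fun d c => if a = c.1 ∨ a = c.2 then d.modify a [] (fun l => l ++ [c]) else d)
      d).getD k []
    = if k = a then d.getD a [] ++ cs.filter (fun c => decide (k = c.1 ∨ k = c.2))
      else d.getD k [] := by
  induction cs generalizing d with
  | nil =>
    simp only [List.foldl_nil, List.filter_nil, List.append_nil]
    by_cases hk : k = a
    · subst hk; simp
    · simp [hk]
  | cons c cs ih =>
    simp only [List.foldl_cons, List.filter_cons]
    rw [ih]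
    by_cases hk : k = a
    · subst hk
      by_cases hp : k = c.1 ∨ k = c.2
      · simp [hp]
      · simp [hp]
    · by_cases hp : a = c.1 ∨ a = c.2
      · simp [hp, hk, PySem.Dict.getD_modify]
      · simp [hp, hk]

-- ---- A's inner loop preserves the key list ----
theorem innerA_keys (cs : List (String × String)) (a : String)
    (d : PySem.Dict String (List (String × String))) (ha : d.contains a = true) :
    (cs.foldl
      (fun d c => if a = c.1 ∨ a = c.2 then d.modify a [] (fun l => l ++ [c]) else d)
      d).keys = d.keys := by
  induction cs generalizing d with
  | nil => rfl
  | cons c cs ih =>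
    simp only [List.foldl_cons]
    by_cases hp : a = c.1 ∨ a = c.2
    · simp only [hp, if_pos]
      rw [ih _ (by simp [PySem.Dict.contains_modify, ha]),
        PySem.Dict.keys_modify, PySem.Dict.keys_insert_of_contains _ _ ha]
    · simp only [hp, if_neg, not_false_iff]
      exact ih d ha

-- ---- A's outer loop: keys ----
theorem outerA_keys (col cs : List String)
    (d : PySem.Dict String (List (String × String))) :
    (cs.foldl
      (fun d a =>
        (pyCombos2 col).foldl
          (fun d c => if a = c.1 ∨ a = c.2 then d.modify a [] (fun l => l ++ [c]) else d)
          (d.insert a []))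
      d).keys = PySem.Set.update d.keys cs := by
  induction cs generalizing d with
  | nil => rfl
  | cons a as ih =>
    simp only [List.foldl_cons, PySem.Set.update_cons]
    rw [ih, innerA_keys _ _ _ (PySem.Dict.contains_insert_self _ _ _)]
    congr 1
    rw [PySem.Set.add_eq_ite]
    by_cases hm : a ∈ d.keys
    · rw [PySem.Dict.keys_insert_of_contains _ _ ((PySem.Dict.contains_iff_mem_keys d a).mpr hm),
        if_pos hm]
    · rw [PySem.Dict.keys_insert_of_not_contains _ _
        (by rw [← Bool.not_eq_true, PySem.Dict.contains_iff_mem_keys]; exact hm), if_neg hm]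

-- ---- A's outer loop: value at k ----
theorem outerA_getD (col cs : List String)
    (d : PySem.Dict String (List (String × String))) (k : String) :
    (cs.foldl
      (fun d a =>
        (pyCombos2 col).foldl
          (fun d c => if a = c.1 ∨ a = c.2 then d.modify a [] (fun l => l ++ [c]) else d)
          (d.insert a []))
      d).getD k []
    = if k ∈ cs then (pyCombos2 col).filter (fun c => decide (k = c.1 ∨ k = c.2))
      else d.getD k [] := by
  induction cs generalizing d with
  | nil => simp
  | cons a as ih =>
    simp only [List.foldl_cons]
    rw [ih]
    by_cases hk : k ∈ as
    · simp [hk]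
    · rw [if_neg hk, innerA_getD]
      by_cases hka : k = a
      · subst hka
        simp
      · simp [hka, hk, PySem.Dict.getD_insert]

-- ---- B: a fold of plain inserts leaves keys it never touches alone ----
theorem foldl_insert_getD_not_mem (ps : List (Int × String))
    (d : PySem.Dict String Int) (k : String) (h : k ∉ ps.map (·.2)) :
    (ps.foldl (fun d p => d.insert p.2 p.1) d).getD k 0 = d.getD k 0 := by
  induction ps generalizing d with
  | nil => rfl
  | cons p ps ih =>
    simp only [List.map_cons, List.mem_cons, not_or] at h
    simp only [List.foldl_cons]
    rw [ih _ h.2, PySem.Dict.getD_insert_of_ne _ _ _ h.1]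

-- ---- B: the idx dict built from enumerate maps keys[j] to j ----
theorem idx_getD (keys : List String) (hk : keys.Nodup) (s : Int)
    (d : PySem.Dict String Int) (j : Nat) (hj : j < keys.length) :
    ((PySem.List.enumerate keys s).foldl (fun d p => d.insert p.2 p.1) d).getD keys[j] 0
      = s + j := by
  induction keys generalizing s d j with
  | nil => simp at hj
  | cons x xs ih =>
    rw [PySem.List.enumerate_cons]
    simp only [List.foldl_cons]
    match j with
    | 0 =>
      have hx : x ∉ (PySem.List.enumerate xs (s + 1)).map (·.2) := by
        rw [PySem.List.map_snd_enumerate]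
        exact (List.nodup_cons.mp hk).1
      simp only [List.getElem_cons_zero]
      rw [foldl_insert_getD_not_mem _ _ _ hx, PySem.Dict.getD_insert_self]
      simp
    | j + 1 =>
      have hj' : j < xs.length := by simpa using hj
      rw [List.getElem_cons_succ, ih (List.nodup_cons.mp hk).2 (s + 1) _ j hj']
      push_cast; ring

-- ---- B's scatter loop over positional buckets: value at every index ----
theorem scatterB_getElem? (pos : String → Nat) (cs : List (String × String))
    (hinj : ∀ c ∈ cs, c.1 ≠ c.2 → pos c.1 ≠ pos c.2)
    (bs : List (List (String × String))) (i : Nat) :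
    (cs.foldl
      (fun bs c =>
        let bs := bs.modify (pos c.1) (fun l => l ++ [c])
        if c.2 ≠ c.1 then bs.modify (pos c.2) (fun l => l ++ [c]) else bs)
      bs)[i]?
    = bs[i]?.map (· ++ cs.filter (fun c => decide (pos c.1 = i ∨ pos c.2 = i))) := by
  induction cs generalizing bs with
  | nil => simp
  | cons c cs ih =>
    simp only [List.foldl_cons, List.filter_cons]
    rw [ih (fun c' hc' => hinj c' (List.mem_cons_of_mem _ hc'))]
    by_cases hne : c.2 ≠ c.1
    · rw [if_pos hne]
      have hpos : pos c.1 ≠ pos c.2 := hinj c List.mem_cons_self (fun h => hne h.symm)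
      rw [List.getElem?_modify, List.getElem?_modify]
      by_cases h1 : pos c.1 = i
      · have h2 : pos c.2 ≠ i := fun h => hpos (h1.trans h.symm)
        cases bs[i]? <;> simp [h1, h2]
      · by_cases h2 : pos c.2 = i
        · cases bs[i]? <;> simp [h1, h2]
        · cases bs[i]? <;> simp [h1, h2]
    · rw [if_neg hne]
      rw [not_not] at hne
      rw [List.getElem?_modify]
      by_cases h1 : pos c.1 = i
      · have h2 : pos c.2 = i := hne ▸ h1
        cases bs[i]? <;> simp [h1, h2]
      · have h2 : pos c.2 ≠ i := by rw [hne]; exact h1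
        cases bs[i]? <;> simp [h1, h2]

-- ---- B: the position a key is scattered to, and its basic facts ----
def bpos (keys : List String) (k : String) : Nat :=
  (((PySem.List.enumerate keys).foldl (fun d p => d.insert p.2 p.1)
      (PySem.Dict.empty : PySem.Dict String Int)).getD k 0).toNat

theorem bpos_at (keys : List String) (hk : keys.Nodup) (j : Nat) (hj : j < keys.length) :
    bpos keys keys[j] = j := by
  unfold bpos
  rw [idx_getD keys hk 0 PySem.Dict.empty j hj]
  simp

theorem bpos_eq_iff (keys : List String) (hk : keys.Nodup) (x : String) (hx : x ∈ keys)
    (i : Nat) (hi : i < keys.length) : bpos keys x = i ↔ keys[i] = x := by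
  obtain ⟨j, hj, e⟩ := List.getElem_of_mem hx
  rw [← e, bpos_at keys hk j hj]
  constructor
  · rintro rfl; rfl
  · intro h
    exact ((List.Nodup.getElem_inj_iff hk).mp h).symm

-- ---- A's result, as a map over the deduped keys ----
theorem A_eq_map (col : List String) :
    build_lattice col
      = (PySem.Set.ofList col : List String).map
          (fun k => (k, (pyCombos2 col).filter (fun c => decide (k = c.1 ∨ k = c.2)))) := by
  unfold build_lattice
  have keysA := outerA_keys col col PySem.Dict.empty
  rw [PySem.Dict.keys_empty, PySem.Set.update_nil_left] at keysA
  have nodup : (PySem.Set.ofList col : List String).Nodup := PySem.Set.nodup_ofList col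
  rw [PySem.Dict.items_eq_map_keys _ (by rw [keysA]; exact nodup) [], keysA]
  refine List.map_congr_left fun k hk => ?_
  rw [outerA_getD, if_pos ((PySem.Set.mem_ofList _ _).mp hk)]

-- ---- B's result, as the same map over the same keys ----
theorem B_eq_map (col : List String) :
    build_lattice_alt col
      = (PySem.Set.ofList col : List String).map
          (fun k => (k, (pyCombos2 col).filter (fun c => decide (k = c.1 ∨ k = c.2)))) := by
  unfold build_lattice_alt
  simp only [PySem.List.dedup_eq_ofList]
  have nodup : (PySem.Set.ofList col : List String).Nodup := PySem.Set.nodup_ofList col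
  rw [List.map_prod_left_eq_zip]
  congr 1
  have hinj : ∀ c ∈ pyCombos2 col, c.1 ≠ c.2 →
      bpos (PySem.Set.ofList col) c.1 ≠ bpos (PySem.Set.ofList col) c.2 := by
    intro c hc hne heq
    obtain ⟨h1, h2⟩ := pyCombos2_mem col c hc
    obtain ⟨j1, hj1, e1⟩ := List.getElem_of_mem ((PySem.Set.mem_ofList _ _).mpr h1)
    obtain ⟨j2, hj2, e2⟩ := List.getElem_of_mem ((PySem.Set.mem_ofList _ _).mpr h2)
    rw [← e1, ← e2, bpos_at _ nodup j1 hj1, bpos_at _ nodup j2 hj2] at heq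
    subst heq
    exact hne (e1.symm.trans e2)
  have hb := scatterB_getElem? (bpos (PySem.Set.ofList col)) (pyCombos2 col) hinj
    ((PySem.Set.ofList col : List String).map (fun _ => ([] : List (String × String))))
  simp only [bpos] at hb
  refine List.ext_getElem? fun i => ?_
  rw [hb i, List.getElem?_map, List.getElem?_map]
  rcases hki : (PySem.Set.ofList col : List String)[i]? with _ | k
  · simp
  · obtain ⟨hi, hk⟩ := List.getElem?_eq_some_iff.mp hki
    simp only [Option.map_some, List.nil_append]
    congr 1
    refine List.filter_congr fun c hc => ?_
    obtain ⟨h1, h2⟩ := pyCombos2_mem col c hc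
    rw [decide_eq_decide]
    have e1 := bpos_eq_iff (PySem.Set.ofList col) nodup c.1
      ((PySem.Set.mem_ofList _ _).mpr h1) i hi
    have e2 := bpos_eq_iff (PySem.Set.ofList col) nodup c.2
      ((PySem.Set.mem_ofList _ _).mpr h2) i hi
    unfold bpos at e1 e2
    rw [e1, e2, hk]

-- ===== VERDICT (by name: the statement is the Claim_ definition above) =====
theorem build_lattice_spec : Claim_equal_build_lattice := by
  intro col _
  unfold Spec_build_lattice
  rw [A_eq_map, B_eq_map]
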